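-- pv_equiv track=rewrite | github.com/yaranasserr/aws | OA leetcodediscuss/delivery.py | min_connected_zones
-- ===== SOURCE A (Python) =====
-- def merge_zones(intervals):
--     """
--     Merges overlapping or adjacent intervals.
--     """
--     intervals.sort()  # Sort the intervals based on the start value
--     merged = []
--
--     for interval in intervals:
--         if not merged or merged[-1][1] < interval[0]:  # No overlap
--             merged.append(interval)
--         else:  # Overlap exists, merge intervals
--             merged[-1] = (merged[-1][0], max(merged[-1][1], interval[1]))
--
--     return merged
--
-- def calculate_connected_zones(intervals):
--     """
--     Calculates the number of connected delivery regions.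
--     """
--     merged_zones = merge_zones(intervals)
--     return len(merged_zones)
--
-- def min_connected_zones(starts, ends, k):
--     """
--     Finds the minimum number of connected delivery regions
--     after adding one new zone of length <= k.
--     """
--     # Create initial list of intervals
--     intervals = list(zip(starts, ends))
--
--     # Binary search bounds for the new zone size
--     low, high = 1, k  # The new zone's length must be between 1 and k
--     best_result = float('inf')
--
--     # Try all possible start and end positions for the new zone
--     for new_start in range(min(starts), max(ends) + 1):  # New zone can start anywhere within the current range
--         for new_end in range(new_start, new_start + k + 1):  # New zone's length <= k
--             if new_end - new_start > k:
--                 continue  # Skip invalid zone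
--
--             new_zone = (new_start, new_end)
--             temp_intervals = intervals + [new_zone]  # Add new zone to the list
--             num_connected = calculate_connected_zones(temp_intervals)
--             best_result = min(best_result, num_connected)
--
--     return best_result
-- ===== SOURCE B (Python) =====
-- # B: sort the intervals once, try only the maximal new zone (x, x+k) for each
-- # start x (a longer zone never increases the merged count), and count merged
-- # regions with a scalar scan over an O(n) sorted insertion -- no per-candidate
-- # sort, no merged-list construction, and the inner length loop is gone.
--
-- def _insert_sorted(lst, z):
--     # insert z into the sorted list lst, after every element <= z
--     i = 0
--     while i < len(lst) and not (z < lst[i]):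
--         i += 1
--     return lst[:i] + [z] + lst[i:]
--
-- def _count_with(base, z):
--     count = 0
--     cur = 0
--     for (s, e) in _insert_sorted(base, z):
--         if count == 0 or cur < s:
--             count += 1
--             cur = e
--         else:
--             cur = max(cur, e)
--     return count
--
-- def min_connected_zones(starts, ends, k):
--     base = sorted(zip(starts, ends))
--     best = None
--     for x in range(min(starts), max(ends) + 1):
--         c = _count_with(base, (x, x + k))
--         if best is None or c < best:
--             best = c
--     return best
-- ===== Notes on version B (the rewrite author's own statement) =====
-- stated objective: faster
-- what changed: B sorts the intervals once, drops A's inner loop over zone lengths (proved: the maximal zone (x, x+k) is always at least as good), and counts merged regions with a scalar (count, cur) scan over an O(n) sorted insertion instead of re-sorting and rebuilding a merged list for every candidate.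
-- outside the precondition, e.g. on min_connected_zones([0], [2], -1): A returns inf, B returns 1; on min_connected_zones([5], [1], 2): A returns inf, B returns None; on min_connected_zones([], [1], 2): A raises ValueError, B raises ValueError
import Mathlib
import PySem

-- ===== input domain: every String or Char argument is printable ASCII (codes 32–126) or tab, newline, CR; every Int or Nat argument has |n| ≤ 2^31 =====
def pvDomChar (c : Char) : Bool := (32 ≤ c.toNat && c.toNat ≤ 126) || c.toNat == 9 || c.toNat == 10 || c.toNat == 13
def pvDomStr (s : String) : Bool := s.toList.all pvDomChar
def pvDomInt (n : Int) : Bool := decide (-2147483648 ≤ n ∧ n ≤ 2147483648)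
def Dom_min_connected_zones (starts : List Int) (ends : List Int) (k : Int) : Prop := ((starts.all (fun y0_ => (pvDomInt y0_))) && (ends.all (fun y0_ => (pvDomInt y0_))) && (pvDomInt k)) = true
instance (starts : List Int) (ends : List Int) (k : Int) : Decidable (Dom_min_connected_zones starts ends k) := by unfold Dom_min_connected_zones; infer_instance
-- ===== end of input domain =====

-- B replaces A's per-candidate sort-and-merge and the inner length loop by one
-- initial sort, a single maximal zone (x, x+k) per start, and a scalar scan;
-- equivalence of the return values is proved under Pre_ below.

-- ===== PORT A =====

-- merge_zones: 'merged[-1] = ...' / 'merged.append(...)' step of A's loop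
def pvMergeStep (m : List (Int × Int)) (iv : Int × Int) : List (Int × Int) :=
  match m.getLast? with
  | none => m ++ [iv]                                   -- 'if not merged: merged.append(interval)'
  | some last =>
      if last.2 < iv.1 then m ++ [iv]                   -- no overlap
      else m.dropLast ++ [(last.1, max last.2 iv.2)]    -- merge into merged[-1]

def merge_zones (intervals : List (Int × Int)) : List (Int × Int) :=
  (PySem.List.sorted2 intervals (fun p => p.1) (fun p => p.2)).foldl pvMergeStep []

def calculate_connected_zones (intervals : List (Int × Int)) : Int :=
  (merge_zones intervals).length

-- best = min(best, c) with best starting at float('inf'): none plays inf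
def pvOMin (best : Option Int) (c : Int) : Option Int :=
  match best with
  | none => some c
  | some b => some (min b c)

def min_connected_zones (starts : List Int) (ends : List Int) (k : Int) : Int :=
  let intervals := starts.zip ends
  -- 'low, high = 1, k' in A is dead code (never read) and is not ported
  match PySem.List.min? starts (fun x => x), PySem.List.max? ends (fun x => x) with
  | some mn, some mx =>
      ((PySem.List.pyRange mn (mx + 1) 1).foldl (fun best x =>
          (PySem.List.pyRange x (x + k + 1) 1).foldl (fun best e =>
            if e - x > k then best
            else pvOMin best (calculate_connected_zones (intervals ++ [(x, e)]))) best)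
        none).getD 0   -- A returns float('inf') when no candidate exists: outside Pre_, port returns 0
  | _, _ => 0          -- min()/max() of an empty list raises ValueError: outside Pre_

-- ===== PORT B =====

-- Python tuple comparison z < y on pairs of ints (lexicographic)
def pvLt (a b : Int × Int) : Bool :=
  decide (a.1 < b.1) || (!decide (b.1 < a.1) && decide (a.2 < b.2))

-- _insert_sorted: insert z before the first strictly greater element
def pvInsertSorted (lst : List (Int × Int)) (z : Int × Int) : List (Int × Int) :=
  PySem.List.insertBy pvLt z lst

-- body of _count_with's scan: state (count, cur)
def pvScanStep (st : Int × Int) (p : Int × Int) : Int × Int :=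
  if st.1 = 0 ∨ st.2 < p.1 then (st.1 + 1, p.2) else (st.1, max st.2 p.2)

def pvCountWith (base : List (Int × Int)) (z : Int × Int) : Int :=
  ((pvInsertSorted base z).foldl pvScanStep (0, 0)).1

def min_connected_zones_alt (starts : List Int) (ends : List Int) (k : Int) : Int :=
  let base := PySem.List.sorted2 (starts.zip ends) (fun p => p.1) (fun p => p.2)
  match PySem.List.min? starts (fun x => x) with
  | none => 0          -- min() of an empty list raises ValueError: outside Pre_
  | some lo =>
    match PySem.List.max? ends (fun x => x) with
    | none => 0        -- max() of an empty list raises ValueError: outside Pre_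
    | some hi =>
      ((PySem.List.pyRange lo (hi + 1) 1).foldl (fun best x =>
          let c := pvCountWith base (x, x + k)
          match best with
          | none => some c
          | some b => if c < b then some c else some b)
        none).getD 0   -- B returns None when the range is empty: outside Pre_, port returns 0

-- ===== PRECONDITION & SPEC =====
-- Pre_ excludes exactly the inputs where A does not return an int: empty starts/ends
-- (min()/max() raises ValueError) and inputs whose candidate loops run zero times
-- (k < 0, or every start above every end), where A returns float('inf').
def Pre_min_connected_zones (starts : List Int) (ends : List Int) (k : Int) : Prop :=
  starts ≠ [] ∧ ends ≠ [] ∧ 0 ≤ k ∧ ∃ s ∈ starts, ∃ e ∈ ends, s ≤ e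
instance (starts : List Int) (ends : List Int) (k : Int) : Decidable (Pre_min_connected_zones starts ends k) := by unfold Pre_min_connected_zones; infer_instance

def pvWitness_min_connected_zones : List Int × List Int × Int := ([1, 6], [3, 9], 2)

def Spec_min_connected_zones (starts : List Int) (ends : List Int) (k : Int) (out : Int) : Prop := out = min_connected_zones_alt starts ends k
instance (starts : List Int) (ends : List Int) (k : Int) (out : Int) : Decidable (Spec_min_connected_zones starts ends k out) := by unfold Spec_min_connected_zones; infer_instance

-- ===== CLAIM (what is proved, stated in full; the proofs are below) =====
def Claim_equal_min_connected_zones : Prop := ∀ (starts : List Int) (ends : List Int) (k : Int), Dom_min_connected_zones starts ends k → Pre_min_connected_zones starts ends k → Spec_min_connected_zones starts ends k (min_connected_zones starts ends k)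

-- ===== LEMMAS AND PROOFS =====

lemma pvLt_true (a b : Int × Int) : pvLt a b = true ↔ a.1 < b.1 ∨ (a.1 ≤ b.1 ∧ a.2 < b.2) := by
  simp [pvLt]

lemma pvLt_false (a b : Int × Int) : pvLt a b = false ↔ b.1 ≤ a.1 ∧ (b.1 < a.1 ∨ b.2 ≤ a.2) := by
  rw [← Bool.not_eq_true, pvLt_true]; omega

lemma pvScanStep_mk (n c s e : Int) :
    pvScanStep (n, c) (s, e) = if n = 0 ∨ c < s then (n + 1, e) else (n, max c e) := rfl

-- insertBy is: keep the prefix not strictly greater than z, place z, keep the rest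
lemma insertBy_eq (before : Int × Int → Int × Int → Bool) (z : Int × Int) :
    ∀ s : List (Int × Int), PySem.List.insertBy before z s =
      s.takeWhile (fun y => !before z y) ++ z :: s.dropWhile (fun y => !before z y) := by
  intro s
  induction s with
  | nil => simp [PySem.List.insertBy]
  | cons y ys ih =>
      by_cases h : before z y
      · simp [PySem.List.insertBy, h]
      · simp [PySem.List.insertBy, h, ih]

lemma sorted2_eq_foldl (xs : List (Int × Int)) :
    PySem.List.sorted2 xs (fun p => p.1) (fun p => p.2) =
      xs.foldl (fun acc x => PySem.List.insertBy pvLt x acc) [] := rfl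

lemma sorted2_append_singleton (l : List (Int × Int)) (z : Int × Int) :
    PySem.List.sorted2 (l ++ [z]) (fun p => p.1) (fun p => p.2) =
      PySem.List.insertBy pvLt z (PySem.List.sorted2 l (fun p => p.1) (fun p => p.2)) := by
  rw [sorted2_eq_foldl, sorted2_eq_foldl, List.foldl_append]; rfl

lemma pairwise_insertBy (x : Int × Int) (l : List (Int × Int))
    (hl : l.Pairwise (fun a b => pvLt b a = false)) :
    (PySem.List.insertBy pvLt x l).Pairwise (fun a b => pvLt b a = false) := by
  induction l with
  | nil => simp [PySem.List.insertBy]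
  | cons y ys ih =>
      rcases List.pairwise_cons.mp hl with ⟨hy, hys⟩
      by_cases h : pvLt x y
      · have hstep : PySem.List.insertBy pvLt x (y :: ys) = x :: y :: ys := by
          simp [PySem.List.insertBy, h]
        rw [hstep, List.pairwise_cons]
        refine ⟨?_, hl⟩
        intro b hb
        rcases List.mem_cons.mp hb with rfl | hb
        · rw [pvLt_false]; rw [pvLt_true] at h; omega
        · have hby := hy b hb
          rw [pvLt_false] at hby ⊢; rw [pvLt_true] at h; omega
      · have hstep : PySem.List.insertBy pvLt x (y :: ys) = y :: PySem.List.insertBy pvLt x ys := by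
          simp [PySem.List.insertBy, h]
        rw [hstep, List.pairwise_cons]
        refine ⟨?_, ih hys⟩
        intro b hb
        rcases (PySem.List.mem_insertBy pvLt x b ys).mp hb with rfl | hb
        · simpa using h
        · exact hy b hb

lemma pairwise_foldl_insertBy (xs : List (Int × Int)) :
    ∀ acc : List (Int × Int), acc.Pairwise (fun a b => pvLt b a = false) →
      (xs.foldl (fun acc x => PySem.List.insertBy pvLt x acc) acc).Pairwise (fun a b => pvLt b a = false) := by
  induction xs with
  | nil => intro acc h; simpa using h
  | cons x xs ih => intro acc h; exact ih _ (pairwise_insertBy x acc h)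

lemma pairwise_sorted2 (xs : List (Int × Int)) :
    (PySem.List.sorted2 xs (fun p => p.1) (fun p => p.2)).Pairwise (fun a b => pvLt b a = false) := by
  rw [sorted2_eq_foldl]; exact pairwise_foldl_insertBy xs [] (by simp)

lemma takeWhile_split (p q : Int × Int → Bool) (h : ∀ y, p y = true → q y = true) :
    ∀ l : List (Int × Int), l.takeWhile q = l.takeWhile p ++ (l.dropWhile p).takeWhile q := by
  intro l
  induction l with
  | nil => simp
  | cons y t ih =>
      by_cases hp : p y
      · simp [hp, h y hp, ih]
      · simp [hp]

lemma dropWhile_split (p q : Int × Int → Bool) (h : ∀ y, p y = true → q y = true) :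
    ∀ l : List (Int × Int), l.dropWhile q = (l.dropWhile p).dropWhile q := by
  intro l
  induction l with
  | nil => simp
  | cons y t ih =>
      by_cases hp : p y
      · simp [hp, h y hp, ih]
      · simp [hp]

lemma dropWhile_head_false (p : Int × Int → Bool) :
    ∀ (s : List (Int × Int)) (d : Int × Int) (r : List (Int × Int)),
      s.dropWhile p = d :: r → p d = false := by
  intro s
  induction s with
  | nil => intro d r h; simp at h
  | cons y t ih =>
      intro d r h
      by_cases hp : p y
      · rw [List.dropWhile_cons, if_pos hp] at h; exact ih d r h
      · rw [List.dropWhile_cons, if_neg hp] at h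
        cases h; simpa using hp

-- scan facts -------------------------------------------------------------

lemma scan_count_nonneg (l : List (Int × Int)) :
    ∀ (n c : Int), 0 ≤ n → 0 ≤ (l.foldl pvScanStep (n, c)).1 := by
  induction l with
  | nil => intro n c h; simpa using h
  | cons p t ih =>
      obtain ⟨s, e⟩ := p
      intro n c h
      rw [List.foldl_cons, pvScanStep_mk]
      by_cases hc : n = 0 ∨ c < s
      · rw [if_pos hc]; exact ih _ _ (by omega)
      · rw [if_neg hc]; exact ih _ _ h

lemma scan_count_succ (l : List (Int × Int)) :
    ∀ (n c : Int), 1 ≤ n →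
      (l.foldl pvScanStep (n + 1, c)).1 = (l.foldl pvScanStep (n, c)).1 + 1 := by
  induction l with
  | nil => intro n c _; rfl
  | cons p t ih =>
      obtain ⟨s, e⟩ := p
      intro n c h
      rw [List.foldl_cons, List.foldl_cons, pvScanStep_mk, pvScanStep_mk]
      by_cases hc : c < s
      · rw [if_pos (Or.inr hc), if_pos (Or.inr hc)]; exact ih _ _ (by omega)
      · rw [if_neg (by omega), if_neg (by omega)]; exact ih _ _ h

lemma scan_mono_cur (l : List (Int × Int)) :
    ∀ (n c c' : Int), 1 ≤ n → c ≤ c' →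
      (l.foldl pvScanStep (n, c')).1 ≤ (l.foldl pvScanStep (n, c)).1 := by
  induction l with
  | nil => intro n c c' _ _; exact le_refl _
  | cons p t ih =>
      obtain ⟨s, e⟩ := p
      intro n c c' hn hcc
      rw [List.foldl_cons, List.foldl_cons, pvScanStep_mk, pvScanStep_mk]
      by_cases h1 : c' < s
      · rw [if_pos (Or.inr h1), if_pos (Or.inr (by omega))]
      · by_cases h2 : c < s
        · rw [if_neg (by omega), if_pos (Or.inr h2), scan_count_succ t n e hn]
          have := ih n e (max c' e) hn (le_max_right _ _)
          omega
        · rw [if_neg (by omega), if_neg (by omega)]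
          exact ih _ _ _ hn (max_le_max hcc (le_refl e))

lemma scan_all_merge (x : Int) :
    ∀ (v : List (Int × Int)) (n c : Int), n ≠ 0 → x ≤ c → (∀ y ∈ v, y.1 ≤ x) →
      v.foldl pvScanStep (n, c) = (n, v.foldl (fun a (y : Int × Int) => max a y.2) c) := by
  intro v
  induction v with
  | nil => intro n c _ _ _; rfl
  | cons y t ih =>
      obtain ⟨s, e⟩ := y
      intro n c hn hx hv
      have hy : s ≤ x := by simpa using hv (s, e) (by simp)
      rw [List.foldl_cons, pvScanStep_mk, if_neg (by omega), List.foldl_cons]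
      exact ih n (max c e) hn (by omega) (fun z hz => hv z (by simp [hz]))

lemma fold_max_shift :
    ∀ (v : List (Int × Int)) (a b : Int),
      v.foldl (fun s (y : Int × Int) => max s y.2) (max a b) =
        max (v.foldl (fun s (y : Int × Int) => max s y.2) a) b := by
  intro v
  induction v with
  | nil => intro a b; rfl
  | cons y t ih =>
      intro a b
      rw [List.foldl_cons, List.foldl_cons, max_right_comm, ih]

lemma fold_max_le :
    ∀ (v : List (Int × Int)) (a M : Int), a ≤ M → (∀ y ∈ v, y.2 ≤ M) →
      v.foldl (fun s (y : Int × Int) => max s y.2) a ≤ M := by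
  intro v
  induction v with
  | nil => intro a M h _; simpa using h
  | cons y t ih =>
      intro a M h hv
      rw [List.foldl_cons]
      refine ih _ _ ?_ (fun z hz => hv z (by simp [hz]))
      have := hv y (by simp)
      omega

lemma fold_max_ge :
    ∀ (v : List (Int × Int)) (a : Int), a ≤ v.foldl (fun s (y : Int × Int) => max s y.2) a := by
  intro v
  induction v with
  | nil => intro a; exact le_refl _
  | cons y t ih =>
      intro a
      rw [List.foldl_cons]
      exact le_trans (le_max_left _ _) (ih (max a y.2))

-- the key exchange: scanning z=(x,e) then v is no better than v then z'=(x,e')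
lemma scan_swap (v : List (Int × Int)) (st : Int × Int) (x e e' : Int)
    (hst : 0 ≤ st.1) (hxe : x ≤ e) (hee : e ≤ e')
    (hv : ∀ y ∈ v, y.1 = x ∧ e < y.2 ∧ y.2 ≤ e') :
    (pvScanStep (v.foldl pvScanStep st) (x, e')).1 = (v.foldl pvScanStep (pvScanStep st (x, e))).1 ∧
    (v.foldl pvScanStep (pvScanStep st (x, e))).2 ≤ (pvScanStep (v.foldl pvScanStep st) (x, e')).2 ∧
    1 ≤ (v.foldl pvScanStep (pvScanStep st (x, e))).1 := by
  obtain ⟨n, c⟩ := st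
  simp only at hst
  have hv1 : ∀ y ∈ v, y.1 ≤ x := fun y hy => le_of_eq (hv y hy).1
  have hv2 : ∀ y ∈ v, y.2 ≤ e' := fun y hy => (hv y hy).2.2
  by_cases hn : n = 0
  · subst hn
    rw [show pvScanStep ((0 : Int), c) (x, e) = (1, e) by simp [pvScanStep_mk],
        scan_all_merge x v 1 e (by norm_num) hxe hv1]
    cases v with
    | nil =>
        rw [List.foldl_nil, List.foldl_nil,
            show pvScanStep ((0 : Int), c) (x, e') = (1, e') by simp [pvScanStep_mk]]
        exact ⟨rfl, hee, le_refl 1⟩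
    | cons y0 v' =>
        obtain ⟨hy1, hy2, hy3⟩ := hv y0 (by simp)
        have hv1' : ∀ y ∈ v', y.1 ≤ x := fun y hy => hv1 y (by simp [hy])
        have hv2' : ∀ y ∈ v', y.2 ≤ e' := fun y hy => hv2 y (by simp [hy])
        rw [List.foldl_cons,
            show pvScanStep ((0 : Int), c) y0 = (1, y0.2) by simp [pvScanStep],
            scan_all_merge x v' 1 y0.2 (by norm_num) (by omega) hv1']
        have hle : v'.foldl (fun a (y : Int × Int) => max a y.2) y0.2 ≤ e' :=
          fold_max_le v' _ _ hy3 hv2'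
        have hge : (x : Int) ≤ v'.foldl (fun a (y : Int × Int) => max a y.2) y0.2 :=
          le_trans (by omega) (fold_max_ge v' y0.2)
        rw [show pvScanStep ((1 : Int), v'.foldl (fun a (y : Int × Int) => max a y.2) y0.2) (x, e') =
              (1, max (v'.foldl (fun a (y : Int × Int) => max a y.2) y0.2) e') by
            rw [pvScanStep_mk, if_neg (by omega)]]
        refine ⟨rfl, ?_, le_refl 1⟩
        show v'.foldl (fun a (y : Int × Int) => max a y.2) (max e y0.2) ≤
          max (v'.foldl (fun a (y : Int × Int) => max a y.2) y0.2) e'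
        exact le_trans (fold_max_le v' _ e' (by omega) hv2') (le_max_right _ _)
  · by_cases hcx : c < x
    · rw [show pvScanStep (n, c) (x, e) = (n + 1, e) by rw [pvScanStep_mk, if_pos (Or.inr hcx)],
          scan_all_merge x v (n + 1) e (by omega) hxe hv1]
      cases v with
      | nil =>
          rw [List.foldl_nil, List.foldl_nil,
              show pvScanStep (n, c) (x, e') = (n + 1, e') by rw [pvScanStep_mk, if_pos (Or.inr hcx)]]
          exact ⟨rfl, hee, by omega⟩
      | cons y0 v' =>
          obtain ⟨hy1, hy2, hy3⟩ := hv y0 (by simp)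
          have hv1' : ∀ y ∈ v', y.1 ≤ x := fun y hy => hv1 y (by simp [hy])
          have hv2' : ∀ y ∈ v', y.2 ≤ e' := fun y hy => hv2 y (by simp [hy])
          rw [List.foldl_cons,
              show pvScanStep (n, c) y0 = (n + 1, y0.2) by
                rw [← Prod.mk.eta (p := y0), pvScanStep_mk, if_pos (Or.inr (by omega))],
              scan_all_merge x v' (n + 1) y0.2 (by omega) (by omega) hv1']
          have hle : v'.foldl (fun a (y : Int × Int) => max a y.2) y0.2 ≤ e' :=
            fold_max_le v' _ _ hy3 hv2'
          have hge : (x : Int) ≤ v'.foldl (fun a (y : Int × Int) => max a y.2) y0.2 :=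
            le_trans (by omega) (fold_max_ge v' y0.2)
          rw [show pvScanStep ((n + 1 : Int), v'.foldl (fun a (y : Int × Int) => max a y.2) y0.2) (x, e') =
                (n + 1, max (v'.foldl (fun a (y : Int × Int) => max a y.2) y0.2) e') by
              rw [pvScanStep_mk, if_neg (by omega)]]
          refine ⟨rfl, ?_, by omega⟩
          show v'.foldl (fun a (y : Int × Int) => max a y.2) (max e y0.2) ≤
            max (v'.foldl (fun a (y : Int × Int) => max a y.2) y0.2) e'
          exact le_trans (fold_max_le v' _ e' (by omega) hv2') (le_max_right _ _)
    · rw [show pvScanStep (n, c) (x, e) = (n, max c e) by rw [pvScanStep_mk, if_neg (by omega)],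
          scan_all_merge x v n (max c e) hn (by omega) hv1,
          scan_all_merge x v n c hn (by omega) hv1]
      have hge : (x : Int) ≤ v.foldl (fun a (y : Int × Int) => max a y.2) c :=
        le_trans (by omega) (fold_max_ge v c)
      rw [show pvScanStep ((n : Int), v.foldl (fun a (y : Int × Int) => max a y.2) c) (x, e') =
            (n, max (v.foldl (fun a (y : Int × Int) => max a y.2) c) e') by
          rw [pvScanStep_mk, if_neg (by omega)]]
      refine ⟨rfl, ?_, by omega⟩
      rw [fold_max_shift v c e]
      omega

-- monotonicity: on a sorted list, inserting the longer zone never increases the count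
lemma count_insert_mono (s : List (Int × Int))
    (hs : s.Pairwise (fun a b => pvLt b a = false)) (x e e' : Int)
    (hxe : x ≤ e) (hee : e ≤ e') :
    ((PySem.List.insertBy pvLt (x, e') s).foldl pvScanStep (0, 0)).1 ≤
      ((PySem.List.insertBy pvLt (x, e) s).foldl pvScanStep (0, 0)).1 := by
  set p : Int × Int → Bool := fun y => !pvLt (x, e) y with hp
  set q : Int × Int → Bool := fun y => !pvLt (x, e') y with hq
  have himp : ∀ y, p y = true → q y = true := by
    intro y hy
    rw [hp] at hy; rw [hq]
    simp only [Bool.not_eq_true'] at hy ⊢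
    rw [pvLt_false] at hy ⊢
    simp only at hy ⊢
    omega
  rw [insertBy_eq pvLt (x, e) s, insertBy_eq pvLt (x, e') s, ← hp, ← hq,
      takeWhile_split p q himp s, dropWhile_split p q himp s]
  set u := s.takeWhile p with hu
  set r := s.dropWhile p with hr
  set v := r.takeWhile q with hvdef
  set w := r.dropWhile q with hw
  have hrvw : r = v ++ w := (List.takeWhile_append_dropWhile (p := q) (l := r)).symm
  -- elements of v lie strictly between the two inserted zones
  have hv : ∀ y ∈ v, y.1 = x ∧ e < y.2 ∧ y.2 ≤ e' := by
    intro y hy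
    have h2 : pvLt (x, e') y = false := by
      have := List.mem_takeWhile_imp hy
      rw [hq] at this; simpa using this
    have hyr : y ∈ r := (List.takeWhile_sublist q).subset hy
    have h1 : pvLt (x, e) y = true := by
      cases hcr : r with
      | nil => rw [hcr] at hyr; simp at hyr
      | cons d r' =>
          have hd : pvLt (x, e) d = true := by
            have := dropWhile_head_false p s d r' (hr ▸ hcr)
            rw [hp] at this; simpa using this
          have hpair : (d :: r').Pairwise (fun a b => pvLt b a = false) := by
            rw [← hcr, hr]; exact hs.sublist (List.dropWhile_sublist p)
          rw [hcr] at hyr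
          rcases List.mem_cons.mp hyr with rfl | hyr'
          · exact hd
          · have hyd : pvLt y d = false := (List.pairwise_cons.mp hpair).1 y hyr'
            rw [pvLt_true] at hd ⊢; rw [pvLt_false] at hyd
            simp only at hd ⊢
            omega
    rw [pvLt_true] at h1; rw [pvLt_false] at h2
    simp only at h1 h2
    omega
  rw [hrvw]
  set st0 := u.foldl pvScanStep ((0 : Int), (0 : Int)) with hst0
  have h0 : 0 ≤ st0.1 := by rw [hst0]; exact scan_count_nonneg u 0 0 (le_refl _)
  obtain ⟨hcnt, hcur, hpos⟩ := scan_swap v st0 x e e' h0 hxe hee hv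
  have lhs_eq : ((u ++ v) ++ (x, e') :: w).foldl pvScanStep ((0 : Int), (0 : Int)) =
      w.foldl pvScanStep (pvScanStep (v.foldl pvScanStep st0) (x, e')) := by
    rw [List.foldl_append, List.foldl_append, List.foldl_cons, hst0]
  have rhs_eq : (u ++ (x, e) :: (v ++ w)).foldl pvScanStep ((0 : Int), (0 : Int)) =
      w.foldl pvScanStep (v.foldl pvScanStep (pvScanStep st0 (x, e))) := by
    rw [List.foldl_append, List.foldl_cons, List.foldl_append, hst0]
  rw [show u ++ v ++ (x, e') :: w = (u ++ v) ++ (x, e') :: w from by simp, lhs_eq, rhs_eq]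
  set r1 := v.foldl pvScanStep (pvScanStep st0 (x, e)) with hr1
  set r2 := pvScanStep (v.foldl pvScanStep st0) (x, e') with hr2
  calc (w.foldl pvScanStep r2).1
      = (w.foldl pvScanStep (r1.1, r2.2)).1 := by
        rw [show r2 = (r2.1, r2.2) from rfl, hcnt]
    _ ≤ (w.foldl pvScanStep (r1.1, r1.2)).1 := scan_mono_cur w r1.1 r1.2 r2.2 hpos hcur
    _ = (w.foldl pvScanStep r1).1 := rfl

-- A's merged-list length is exactly B's scalar scan ----------------------

lemma merge_scan_len :
    ∀ (l m : List (Int × Int)) (a b : Int), m.getLast? = some (a, b) →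
      ((l.foldl pvMergeStep m).length : Int) =
        (l.foldl pvScanStep ((m.length : Int), b)).1 := by
  intro l
  induction l with
  | nil => intro m a b _; simp
  | cons iv t ih =>
      obtain ⟨s, e⟩ := iv
      intro m a b hlast
      have hm : m ≠ [] := by intro h; rw [h] at hlast; simp at hlast
      have hlen : 1 ≤ m.length := List.length_pos_iff.mpr hm
      rw [List.foldl_cons, List.foldl_cons, pvScanStep_mk]
      simp only [pvMergeStep, hlast]
      by_cases hb : b < s
      · rw [if_pos hb, if_pos (Or.inr hb)]
        have hrec := ih (m ++ [(s, e)]) s e (by simp)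
        have hl : ((m ++ [(s, e)]).length : Int) = (m.length : Int) + 1 := by
          simp
        rw [hrec, hl]
      · rw [if_neg hb, if_neg (by omega)]
        have hrec := ih (m.dropLast ++ [(a, max b e)]) a (max b e) (by simp)
        have hl : ((m.dropLast ++ [(a, max b e)]).length : Int) = (m.length : Int) := by
          simp [List.length_dropLast]
          omega
        rw [hrec, hl]

lemma count_merge (l : List (Int × Int)) :
    ((l.foldl pvMergeStep []).length : Int) =
      (l.foldl pvScanStep ((0 : Int), (0 : Int))).1 := by
  cases l with
  | nil => rfl
  | cons iv t =>
      obtain ⟨s, e⟩ := iv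
      rw [List.foldl_cons, List.foldl_cons, pvScanStep_mk, if_pos (Or.inl rfl),
          show pvMergeStep [] (s, e) = [(s, e)] from by simp [pvMergeStep]]
      have := merge_scan_len t [(s, e)] s e (by simp)
      simpa using this

-- A's per-candidate pipeline equals B's count over the pre-sorted base
lemma candidate_eq (I : List (Int × Int)) (z : Int × Int) :
    calculate_connected_zones (I ++ [z]) =
      pvCountWith (PySem.List.sorted2 I (fun p => p.1) (fun p => p.2)) z := by
  unfold calculate_connected_zones merge_zones pvCountWith pvInsertSorted
  rw [sorted2_append_singleton]
  exact count_merge _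

-- folding min(best, f e) collapses against the running minimum -----------

lemma foldl_pvOMin (f : Int → Int) :
    ∀ (t : List Int) (acc : Option Int) (c : Int),
      t.foldl (fun b e => pvOMin b (f e)) (pvOMin acc c) =
        pvOMin acc (t.foldl (fun m e => min m (f e)) c) := by
  intro t
  induction t with
  | nil => intro acc c; rfl
  | cons d t ih =>
      intro acc c
      rw [List.foldl_cons, List.foldl_cons,
          show pvOMin (pvOMin acc c) (f d) = pvOMin acc (min c (f d)) from by
            cases acc <;> simp [pvOMin, min_assoc]]
      exact ih acc (min c (f d))

lemma bstep_eq_pvOMin (b : Option Int) (c : Int) :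
    (match b with
     | none => some c
     | some bb => if c < bb then some c else some bb) = pvOMin b c := by
  cases b with
  | none => rfl
  | some bb =>
      simp only [pvOMin]
      rw [min_def]
      split_ifs <;> (first | rfl | omega)

-- the inner loop of A returns exactly the value at the maximal zone (x, x+k)
lemma inner_min (f : Int → Int) (x k : Int) (hk : 0 ≤ k)
    (hmono : ∀ e, x ≤ e → e ≤ x + k → f (x + k) ≤ f e) (acc : Option Int) :
    (PySem.List.pyRange x (x + k + 1) 1).foldl (fun b e => pvOMin b (f e)) acc =
      pvOMin acc (f (x + k)) := by
  rw [PySem.List.pyRange_one_cons (by omega : x < x + k + 1), List.foldl_cons,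
      show pvOMin acc (f x) = pvOMin acc (f x) from rfl, foldl_pvOMin]
  congr 1
  rw [← List.foldl_map (f := f) (g := min)]
  set t := (PySem.List.pyRange (x + 1) (x + k + 1) 1).map f with ht
  have hboundall : ∀ y ∈ t, f (x + k) ≤ y := by
    intro y hy
    rw [ht] at hy
    obtain ⟨e, he, rfl⟩ := List.mem_map.mp hy
    rw [PySem.List.mem_pyRange_one] at he
    exact hmono e (by omega) (by omega)
  rcases eq_or_lt_of_le hk with hk0 | hkpos
  · have hnil : PySem.List.pyRange (x + 1) (x + k + 1) 1 = [] :=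
      PySem.List.pyRange_one_eq_nil (by omega)
    rw [ht, hnil, List.map_nil, List.foldl_nil]
    congr 1
    omega
  · have hmem : f (x + k) ∈ t := by
      rw [ht]
      exact List.mem_map_of_mem (by rw [PySem.List.mem_pyRange_one]; omega)
    have hle : t.foldl min (f x) ≤ f (x + k) := (PySem.List.foldl_min_le t (f x)).2 _ hmem
    have hge : f (x + k) ≤ t.foldl min (f x) := by
      rcases PySem.List.foldl_min_mem t (f x) with h | h
      · rw [h]; exact hmono x (le_refl _) (by omega)
      · exact hboundall _ h
    omega

-- ===== VERDICT (by name: the statement is the Claim_ definition above) =====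
theorem min_connected_zones_spec : Claim_equal_min_connected_zones := by
  intro starts ends k _ hpre
  obtain ⟨h1, h2, hk, -⟩ := hpre
  unfold Spec_min_connected_zones min_connected_zones min_connected_zones_alt
  cases hmn : PySem.List.min? starts (fun x => x) with
  | none => exact absurd ((PySem.List.min?_eq_none_iff starts _).mp hmn) h1
  | some mn =>
  cases hmx : PySem.List.max? ends (fun x => x) with
  | none => exact absurd ((PySem.List.max?_eq_none_iff ends _).mp hmx) h2
  | some mx =>
  simp only
  congr 1
  apply PySem.List.foldl_congr_mem
  intro acc x _
  set base := PySem.List.sorted2 (starts.zip ends) (fun p => p.1) (fun p => p.2) with hbase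
  set f : Int → Int := fun e => pvCountWith base (x, e) with hf
  have hbody : (PySem.List.pyRange x (x + k + 1) 1).foldl
      (fun best e => if e - x > k then best
        else pvOMin best (calculate_connected_zones (starts.zip ends ++ [(x, e)]))) acc =
      (PySem.List.pyRange x (x + k + 1) 1).foldl (fun best e => pvOMin best (f e)) acc := by
    apply PySem.List.foldl_congr_mem
    intro b e he
    rw [PySem.List.mem_pyRange_one] at he
    rw [if_neg (by omega), candidate_eq, ← hbase, hf]
  rw [hbody, inner_min f x k hk ?_ acc, bstep_eq_pvOMin]
  intro e hxe hek
  rw [hf]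
  exact count_insert_mono base (pairwise_sorted2 _) x e (x + k) hxe hek
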